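-- pv_equiv track=rewrite | github.com/9x14S/nand2tetris-progress | 06/assembler/PythonVer/lib/insts.py | get_dest
-- ===== SOURCE A (Python) =====
-- def get_dest(dest: str | bool) -> str:
--     if type(dest) == bool:
--         return "000"
--
--     A, D, M = ('0', '0', '0')
--     for letter in dest:
--         match letter:
--             case 'M':
--                 M = '1'
--             case 'A':
--                 A = '1'
--             case 'D':
--                 D = '1'
--             case ' ':
--                 continue
--             case _ as err:
--                 raise SyntaxError(f"Unknown destination <{err}>. ")
--
--     d_code: str = A + D + M
--     return d_code
-- ===== SOURCE B (Python) =====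
-- def get_dest(dest: str | bool) -> str:
--     if type(dest) == bool:
--         return "000"
--     for letter in dest:
--         if letter not in "ADM ":
--             raise SyntaxError(f"Unknown destination <{letter}>. ")
--     return ('1' if 'A' in dest else '0') + ('1' if 'D' in dest else '0') + ('1' if 'M' in dest else '0')
-- ===== Notes on version B (the rewrite author's own statement) =====
-- stated objective: idiomatic
-- what changed: Replaces the single state-machine pass that classifies each character into one of three flags with a validation loop followed by three independent membership tests building each bit directly.
import Mathlib
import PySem

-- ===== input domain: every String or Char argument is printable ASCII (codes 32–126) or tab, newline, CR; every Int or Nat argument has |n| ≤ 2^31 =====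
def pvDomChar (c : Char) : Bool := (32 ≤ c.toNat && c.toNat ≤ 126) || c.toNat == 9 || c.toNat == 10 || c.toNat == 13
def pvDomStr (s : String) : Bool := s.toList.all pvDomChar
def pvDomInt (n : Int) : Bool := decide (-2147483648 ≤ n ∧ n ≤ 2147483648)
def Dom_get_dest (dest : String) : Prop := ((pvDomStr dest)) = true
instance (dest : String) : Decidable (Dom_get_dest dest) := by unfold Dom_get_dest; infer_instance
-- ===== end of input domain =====

-- B replaces A's one classifying pass with a validation loop plus three membership tests (idiomatic; equal cost).
-- The Lean signature takes a String, so Python A's `type(dest) == bool` guard is unreachable and not ported.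

-- ===== PORT A =====
-- A's for-loop over the characters with state (A, D, M); `none` models the raised SyntaxError.
def get_dest_loop : List Char → Char → Char → Char → Option (Char × Char × Char)
  | [], a, d, m => some (a, d, m)
  | c :: rest, a, d, m =>
    if c = 'M' then get_dest_loop rest a d '1'
    else if c = 'A' then get_dest_loop rest '1' d m
    else if c = 'D' then get_dest_loop rest a '1' m
    else if c = ' ' then get_dest_loop rest a d m
    else none

def get_dest (dest : String) : String :=
  match get_dest_loop dest.toList '0' '0' '0' with
  | some (a, d, m) => String.ofList [a, d, m]
  | none => ""   -- SyntaxError: excluded by Pre_get_dest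

-- ===== PORT B =====
def get_dest_alt (dest : String) : String :=
  if dest.toList.all (fun c => c ∈ ['A', 'D', 'M', ' ']) then
    String.ofList [if 'A' ∈ dest.toList then '1' else '0',
               if 'D' ∈ dest.toList then '1' else '0',
               if 'M' ∈ dest.toList then '1' else '0']
  else ""   -- SyntaxError: excluded by Pre_get_dest

-- ===== PRECONDITION & SPEC =====
-- Pre_ excludes exactly the inputs containing a character outside {A,D,M,space}, on which
-- both Python A and Python B raise SyntaxError.
def Pre_get_dest (dest : String) : Prop :=
  dest.toList.all (fun c => c == 'A' || c == 'D' || c == 'M' || c == ' ') = true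
instance (dest : String) : Decidable (Pre_get_dest dest) := by unfold Pre_get_dest; infer_instance
def pvWitness_get_dest : String := "AD M"

def Spec_get_dest (dest : String) (out : String) : Prop := out = get_dest_alt dest
instance (dest : String) (out : String) : Decidable (Spec_get_dest dest out) := by unfold Spec_get_dest; infer_instance

-- ===== CLAIM (what is proved, stated in full; the proofs are below) =====
def Claim_equal_get_dest : Prop := ∀ (dest : String), Dom_get_dest dest → Pre_get_dest dest → Spec_get_dest dest (get_dest dest)

-- ===== LEMMAS AND PROOFS =====
theorem get_dest_loop_valid (l : List Char) (a d m : Char)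
    (h : ∀ c ∈ l, c = 'A' ∨ c = 'D' ∨ c = 'M' ∨ c = ' ') :
    get_dest_loop l a d m =
      some (if 'A' ∈ l then '1' else a, if 'D' ∈ l then '1' else d, if 'M' ∈ l then '1' else m) := by
  induction l generalizing a d m with
  | nil => simp [get_dest_loop]
  | cons c rest ih =>
    have hc := h c (by simp)
    have hrest : ∀ x ∈ rest, x = 'A' ∨ x = 'D' ∨ x = 'M' ∨ x = ' ' :=
      fun x hx => h x (by simp [hx])
    rcases hc with rfl | rfl | rfl | rfl <;>
      simp [get_dest_loop, ih _ _ _ hrest]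

-- ===== VERDICT (by name: the statement is the Claim_ definition above) =====
theorem get_dest_spec : Claim_equal_get_dest := by
  intro dest _ hpre
  unfold Spec_get_dest get_dest get_dest_alt
  unfold Pre_get_dest at hpre
  simp only [List.all_eq_true] at hpre
  have hpre' : ∀ c ∈ dest.toList, c = 'A' ∨ c = 'D' ∨ c = 'M' ∨ c = ' ' := by
    intro c hc
    have := hpre c hc
    simp only [Bool.or_eq_true, beq_iff_eq] at this
    tauto
  have hall : dest.toList.all (fun c => c ∈ ['A', 'D', 'M', ' ']) = true := by
    simp only [List.all_eq_true]
    intro c hc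
    rcases hpre' c hc with rfl | rfl | rfl | rfl <;> simp
  rw [get_dest_loop_valid _ _ _ _ hpre', hall]
  simp
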